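-- pv_equiv track=rewrite | github.com/arichen/algorithm-notes | Amazon OA/optimizing_box_weights.py | optimizing_box_weights
-- ===== SOURCE A (Python) =====
-- from typing import List
--
-- def optimizing_box_weights(arr: List[int]) -> List[int]:
--     arr = sorted(arr)
--     n = len(arr)
--
--     pre = arr[::]
--     # calculate the prefix sum
--     for i in range(1, n):
--         pre[i] += pre[i - 1]
--
--     # iterate from the largest item, stop when right partition > left partition
--     i = n - 2
--     while i >= 0 and pre[n - 1] - pre[i] <= pre[i]:
--         i -= 1
--     return arr[i + 1:]
-- ===== SOURCE B (Python) =====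
-- def optimizing_box_weights(arr):
--     arr = sorted(arr)
--     total = sum(arr)
--     p = 0
--     split = 0
--     for k, x in enumerate(arr[:-1]):
--         p += x
--         if 2 * p < total:
--             split = k + 1
--     return arr[split:]
-- ===== Notes on version B (the rewrite author's own statement) =====
-- stated objective: simpler
-- what changed: Instead of A's prefix-sum table plus a backward while-loop that breaks at the first heavy-enough suffix, B makes one forward enumerate pass with a running sum and records the LAST split index whose prefix side is strictly lighter than the rest (equal by maximality), slicing there; no table, no reversal, no break.
import Mathlib
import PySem

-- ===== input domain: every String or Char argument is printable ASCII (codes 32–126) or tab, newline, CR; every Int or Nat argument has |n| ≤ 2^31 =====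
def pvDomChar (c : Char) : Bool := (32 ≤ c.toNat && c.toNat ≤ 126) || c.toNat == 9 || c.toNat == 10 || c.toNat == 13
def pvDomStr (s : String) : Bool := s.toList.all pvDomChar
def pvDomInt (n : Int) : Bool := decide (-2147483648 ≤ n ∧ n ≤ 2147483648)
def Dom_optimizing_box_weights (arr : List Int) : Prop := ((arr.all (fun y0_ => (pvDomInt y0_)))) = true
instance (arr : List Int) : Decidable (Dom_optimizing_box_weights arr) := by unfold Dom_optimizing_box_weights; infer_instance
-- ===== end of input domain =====

-- B replaces A's prefix-sum table + backward break-at-first-success scan with one forward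
-- enumerate pass recording the last split index whose prefix side is lighter (simpler).

-- ===== PORT A =====
-- pre[i] += pre[i-1] for i in range(1, n): indices are always in range, so pySetD/pyGetD are exact
def owbStep (pre : List Int) (i : Int) : List Int :=
  PySem.List.pySetD pre i (PySem.List.pyGetD pre i 0 + PySem.List.pyGetD pre (i - 1) 0)

-- the while-loop 'i = n-2; while i >= 0 and pre[n-1]-pre[i] <= pre[i]: i -= 1', fuel = i+1; returns final i
def owbLoopA (pre : List Int) (n : Nat) : Nat → Int
  | 0 => -1
  | k + 1 =>
      if PySem.List.pyGetD pre ((n : Int) - 1) 0 - PySem.List.pyGetD pre (k : Int) 0 ≤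
          PySem.List.pyGetD pre (k : Int) 0 then
        owbLoopA pre n k
      else (k : Int)

def optimizing_box_weights (arr : List Int) : List Int :=
  let s := PySem.List.sorted arr (fun x => x) false
  let n := s.length
  let pre0 := PySem.List.slice s none none          -- pre = arr[::]
  let pre := (PySem.List.pyRange 1 (n : Int) 1).foldl owbStep pre0
  let i := owbLoopA pre n (n - 1)                   -- i starts at n - 2, fuel n - 1
  PySem.List.slice s (some (i + 1)) none            -- arr[i+1:]

-- ===== PORT B =====
-- one step of 'for k, x in enumerate(arr[:-1]): p += x; if 2*p < total: split = k+1'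
def owbStepB (total : Int) (st : Int × Int) (kx : Int × Int) : Int × Int :=
  let p := st.1 + kx.2
  (p, if 2 * p < total then kx.1 + 1 else st.2)

def optimizing_box_weights_alt (arr : List Int) : List Int :=
  let s := PySem.List.sorted arr (fun x => x) false
  let total := s.sum
  let st := (PySem.List.enumerate (PySem.List.slice s none (some (-1))) 0).foldl (owbStepB total) (0, 0)
  PySem.List.slice s (some st.2) none               -- arr[split:]

-- ===== PRECONDITION & SPEC =====
def Spec_optimizing_box_weights (arr : List Int) (out : List Int) : Prop := out = optimizing_box_weights_alt arr
instance (arr : List Int) (out : List Int) : Decidable (Spec_optimizing_box_weights arr out) := by unfold Spec_optimizing_box_weights; infer_instance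

-- ===== CLAIM (what is proved, stated in full; the proofs are below) =====
def Claim_equal_optimizing_box_weights : Prop := ∀ (arr : List Int), Dom_optimizing_box_weights arr → Spec_optimizing_box_weights arr (optimizing_box_weights arr)

-- ===== LEMMAS AND PROOFS =====

lemma owb_take_succ_sum (s : List Int) (k : Nat) (h : k < s.length) :
    (s.take (k + 1)).sum = (s.take k).sum + s[k] := by
  rw [List.take_add_one, List.sum_append]
  simp [List.getElem?_eq_getElem h]

-- prefix-sum loop invariant
lemma owbPre_spec (s : List Int) (m : Nat) (hm : m < s.length) :
    ((PySem.List.pyRange 1 ((m : Int) + 1) 1).foldl owbStep s).length = s.length ∧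
    (∀ k : Nat, k ≤ m →
      PySem.List.pyGetD ((PySem.List.pyRange 1 ((m : Int) + 1) 1).foldl owbStep s) (k : Int) 0
        = (s.take (k + 1)).sum) ∧
    (∀ k : Nat, m < k →
      PySem.List.pyGetD ((PySem.List.pyRange 1 ((m : Int) + 1) 1).foldl owbStep s) (k : Int) 0
        = PySem.List.pyGetD s (k : Int) 0) := by
  induction m with
  | zero =>
      rw [show ((0 : Nat) : Int) + 1 = 1 by norm_num, PySem.List.pyRange_one_eq_nil le_rfl]
      refine ⟨rfl, ?_, fun k _ => rfl⟩
      intro k hk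
      interval_cases k
      cases s with
      | nil => simp at hm
      | cons a t => simp
  | succ m ih =>
      have hm' : m < s.length := Nat.lt_of_succ_lt hm
      obtain ⟨hlen, hle, hgt⟩ := ih hm'
      have hc1 : (((m + 1 : Nat) : Int) + 1) = ((m : Int) + 1) + 1 := by push_cast; ring
      rw [hc1, PySem.List.pyRange_one_succ_right (by omega), List.foldl_append]
      set P := (PySem.List.pyRange 1 ((m : Int) + 1) 1).foldl owbStep s with hP
      have hc2 : ((m : Int) + 1) = ((m + 1 : Nat) : Int) := by push_cast; ring
      simp only [List.foldl_cons, List.foldl_nil, owbStep]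
      rw [show ((m : Int) + 1 - 1) = ((m : Nat) : Int) by ring, hc2]
      have hv : PySem.List.pyGetD P ((m + 1 : Nat) : Int) 0 + PySem.List.pyGetD P ((m : Nat) : Int) 0
          = (s.take (m + 1 + 1)).sum := by
        rw [hgt (m + 1) (Nat.lt_succ_self m), hle m le_rfl,
          owb_take_succ_sum s (m + 1) hm, PySem.List.pyGetD_natCast,
          List.getD_eq_getElem s 0 hm]
        ring
      refine ⟨by rw [PySem.List.length_pySetD, hlen], ?_, ?_⟩
      · intro k hk
        rw [PySem.List.pyGetD_pySetD_natCast P (m + 1) k _ 0 (by omega)]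
        by_cases hkm : k = m + 1
        · subst hkm
          rw [if_pos rfl]
          exact hv
        · rw [if_neg hkm, hle k (by omega)]
      · intro k hk
        rw [PySem.List.pyGetD_pySetD_natCast P (m + 1) k _ 0 (by omega),
          if_neg (by omega), hgt k (by omega)]

-- enumerate over an appended singleton
lemma owb_enumerate_append_singleton (L : List Int) (x : Int) (j : Int) :
    PySem.List.enumerate (L ++ [x]) j
      = PySem.List.enumerate L j ++ [(j + (L.length : Int), x)] := by
  induction L generalizing j with
  | nil => simp [PySem.List.enumerate_cons, PySem.List.enumerate_nil]
  | cons y t ih =>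
      rw [List.cons_append, PySem.List.enumerate_cons, PySem.List.enumerate_cons, ih (j + 1)]
      have : j + 1 + (t.length : Int) = j + ((t.length + 1 : Nat) : Int) := by push_cast; ring
      simp [this]

-- forward fold over the first m elements computes (prefix sum, A's loop result + 1)
lemma owb_fold_eq_loop (s pre : List Int)
    (hpre : ∀ k : Nat, k < s.length →
      PySem.List.pyGetD pre (k : Int) 0 = (s.take (k + 1)).sum)
    (htot : PySem.List.pyGetD pre ((s.length : Int) - 1) 0 = s.sum) :
    ∀ m : Nat, m ≤ s.length - 1 →
      (PySem.List.enumerate (s.take m) 0).foldl (owbStepB s.sum) (0, 0)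
        = ((s.take m).sum, owbLoopA pre s.length m + 1) := by
  intro m
  induction m with
  | zero => intro _; simp [PySem.List.enumerate_nil, owbLoopA]
  | succ m ih =>
      intro hm
      have hms : m < s.length := by omega
      have hrec := ih (by omega)
      have htk : s.take (m + 1) = s.take m ++ [s[m]] := by
        rw [List.take_add_one]; simp [List.getElem?_eq_getElem hms]
      rw [htk, owb_enumerate_append_singleton, List.foldl_append, hrec]
      simp only [owbStepB, List.foldl_cons, List.foldl_nil]
      have hlen : ((s.take m).length : Int) = (m : Int) := by
        simp [List.length_take, Nat.min_eq_left (le_of_lt hms)]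
      have hsum : (s.take m).sum + s[m] = (s.take (m + 1)).sum :=
        (owb_take_succ_sum s m hms).symm
      simp only [hlen, zero_add, hsum]
      have hA : owbLoopA pre s.length (m + 1)
          = if s.sum - (s.take (m + 1)).sum ≤ (s.take (m + 1)).sum then
              owbLoopA pre s.length m else (m : Int) := by
        simp only [owbLoopA, htot, hpre m hms]
      rw [hA, List.sum_append]
      simp only [List.sum_cons, List.sum_nil, add_zero, hsum]
      by_cases hc : 2 * (s.take (m + 1)).sum < s.sum
      · rw [if_pos hc, if_neg (by omega)]
      · rw [if_neg hc, if_pos (by omega)]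

-- ===== VERDICT (by name: the statement is the Claim_ definition above) =====
theorem optimizing_box_weights_spec : Claim_equal_optimizing_box_weights := by
  intro arr _
  unfold Spec_optimizing_box_weights optimizing_box_weights optimizing_box_weights_alt
  simp only [PySem.List.slice_none_none]
  by_cases h0 : arr = []
  · subst h0; rfl
  · set s := PySem.List.sorted arr (fun x => x) false with hs
    have hn : 1 ≤ s.length := by
      rw [hs, PySem.List.length_sorted]
      cases arr with
      | nil => exact absurd rfl h0
      | cons a t => simp
    have hpre : ∀ k : Nat, k < s.length →
        PySem.List.pyGetD ((PySem.List.pyRange 1 ((s.length : Nat) : Int) 1).foldl owbStep s)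
          (k : Int) 0 = (s.take (k + 1)).sum := by
      intro k hk
      have hcast : ((s.length - 1 : Nat) : Int) + 1 = ((s.length : Nat) : Int) := by omega
      have h := (owbPre_spec s (s.length - 1) (by omega)).2.1 k (by omega)
      rw [hcast] at h
      exact h
    have htot : PySem.List.pyGetD ((PySem.List.pyRange 1 ((s.length : Nat) : Int) 1).foldl owbStep s)
        ((s.length : Int) - 1) 0 = s.sum := by
      rw [show ((s.length : Int) - 1) = ((s.length - 1 : Nat) : Int) by omega,
        hpre (s.length - 1) (by omega), show s.length - 1 + 1 = s.length by omega,
        List.take_length]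
    have main := owb_fold_eq_loop s _ hpre htot (s.length - 1) le_rfl
    rw [PySem.List.slice_to_neg_one, List.dropLast_eq_take, main]
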